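-- pv_equiv track=rewrite | github.com/pypi-data/pypi-mirror-287 | packages/lottokit/lottokit-1.9.tar.gz/lottokit-1.9/lottokit/utils/calculate_util.py | calculate_edge_number_index
-- ===== SOURCE A (Python) =====
-- from typing import Iterable, List, Tuple, Any, Optional, Union, Set, Dict, Generator
--
-- def calculate_edge_number_index(target_data: List[int], input_data: List[int]) -> List[int]:
--     """
--     Finds the indices in 'target_data' where the numbers are adjacent to any number in 'input_data'.
--     A number is considered adjacent if it's either one smaller or one larger.
--
--     Args:
--     target_data (List[int]): The list of target integers.
--     input_data (List[int]): The list of input integers to check for adjacency.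
--
--     Returns:
--     List[int]: A list of indices (1-based) in 'target_data' where numbers are adjacent to any in 'input_data'.
--     """
--     edge_info = []
--     for ind, num in enumerate(target_data):
--         edge_nums = set(num + i for i in [-1, 1])
--         plead_edge = set(input_data).intersection(edge_nums)
--         if len(plead_edge) > 0:
--             edge_info.append(ind)
--     return edge_info
-- ===== SOURCE B (Python) =====
-- def calculate_edge_number_index(target_data, input_data):
--     # Index target_data by value once, then enumerate hits from the input side
--     # and sort the collected index set at the end.
--     positions = {}
--     for ind, num in enumerate(target_data):
--         positions.setdefault(num, []).append(ind)
--     hit = set()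
--     for x in input_data:
--         hit.update(positions.get(x - 1, []))
--         hit.update(positions.get(x + 1, []))
--     return sorted(hit)
-- ===== Notes on version B (the rewrite author's own statement) =====
-- stated objective: faster
-- what changed: B builds a value-to-indices dictionary over target_data once, then enumerates hits from the input side (collecting indices of x-1 and x+1 for each input x into a set) and sorts the index set at the end, instead of A's per-target-element set intersection.
import Mathlib
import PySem

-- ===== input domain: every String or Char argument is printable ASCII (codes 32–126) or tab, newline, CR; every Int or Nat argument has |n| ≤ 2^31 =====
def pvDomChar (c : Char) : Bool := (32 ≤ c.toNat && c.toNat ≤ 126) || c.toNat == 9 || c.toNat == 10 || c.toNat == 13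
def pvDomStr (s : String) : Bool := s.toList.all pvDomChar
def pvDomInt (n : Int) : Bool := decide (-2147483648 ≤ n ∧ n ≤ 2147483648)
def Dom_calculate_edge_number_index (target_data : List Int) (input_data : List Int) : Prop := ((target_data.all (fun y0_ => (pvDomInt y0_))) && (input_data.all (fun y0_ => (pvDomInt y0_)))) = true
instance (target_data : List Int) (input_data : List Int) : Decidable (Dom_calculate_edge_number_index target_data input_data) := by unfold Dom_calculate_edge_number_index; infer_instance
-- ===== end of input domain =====

-- B indexes target_data by value once, enumerates hits from the input side into a set, and sorts at the end (faster).

-- ===== PORT A =====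
def calculate_edge_number_index (target_data : List Int) (input_data : List Int) : List Int :=
  (PySem.List.enumerate target_data 0).foldl
    (fun edge_info p =>
      let edge_nums : PySem.Set Int := PySem.Set.ofList ([-1, 1].map (fun j => p.2 + j))
      let plead_edge : PySem.Set Int := PySem.Set.inter (PySem.Set.ofList input_data) edge_nums
      if PySem.Set.len plead_edge > 0 then edge_info ++ [p.1] else edge_info) []

-- ===== PORT B =====
def calculate_edge_number_index_alt (target_data : List Int) (input_data : List Int) : List Int :=
  let positions : PySem.Dict Int (List Int) :=
    (PySem.List.enumerate target_data 0).foldl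
      (fun d p => d.modify p.2 [] (fun l => l ++ [p.1])) PySem.Dict.empty
  let hit : PySem.Set Int :=
    input_data.foldl
      (fun s x => PySem.Set.update (PySem.Set.update s (positions.getD (x - 1) []))
                                   (positions.getD (x + 1) [])) PySem.Set.empty
  PySem.List.sorted hit (fun i => i) false

-- ===== PRECONDITION & SPEC =====
def Spec_calculate_edge_number_index (target_data : List Int) (input_data : List Int) (out : List Int) : Prop := out = calculate_edge_number_index_alt target_data input_data
instance (target_data : List Int) (input_data : List Int) (out : List Int) : Decidable (Spec_calculate_edge_number_index target_data input_data out) := by unfold Spec_calculate_edge_number_index; infer_instance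

-- ===== CLAIM (what is proved, stated in full; the proofs are below) =====
def Claim_equal_calculate_edge_number_index : Prop := ∀ (target_data : List Int) (input_data : List Int), Dom_calculate_edge_number_index target_data input_data → Spec_calculate_edge_number_index target_data input_data (calculate_edge_number_index target_data input_data)

-- ===== LEMMAS AND PROOFS =====

-- A's test 'set(input) ∩ {num-1, num+1} nonempty' as an existential
theorem pv_condA_iff (input_data : List Int) (num : Int) :
    (PySem.Set.len (PySem.Set.inter (PySem.Set.ofList input_data)
        (PySem.Set.ofList ([-1, 1].map (fun j => num + j)))) > 0)
      ↔ ∃ x ∈ input_data, x = num - 1 ∨ x = num + 1 := by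
  simp only [PySem.Set.len, gt_iff_lt]
  rw [Int.natCast_pos, List.length_pos_iff_exists_mem]
  constructor
  · rintro ⟨x, hx⟩
    have hx' := (PySem.Set.mem_inter _ _ _).1 hx
    rcases hx' with ⟨h1, h2⟩
    rw [PySem.Set.mem_ofList] at h1 h2
    simp only [List.map_cons, List.map_nil, List.mem_cons, List.not_mem_nil, or_false] at h2
    exact ⟨x, h1, by omega⟩
  · rintro ⟨x, hx, hor⟩
    refine ⟨x, (PySem.Set.mem_inter _ _ _).2 ⟨?_, ?_⟩⟩
    · rw [PySem.Set.mem_ofList]; exact hx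
    · rw [PySem.Set.mem_ofList]
      simp only [List.map_cons, List.map_nil, List.mem_cons, List.not_mem_nil, or_false]
      omega

-- B's positions dictionary: lookup of v yields exactly the indices where target holds v
theorem pv_positions_getD (target_data : List Int) (v : Int) :
    (((PySem.List.enumerate target_data 0).foldl
        (fun d p => d.modify p.2 [] (fun l => l ++ [p.1])) PySem.Dict.empty).getD v [])
      = ((PySem.List.enumerate target_data 0).filter (fun p => p.2 == v)).map (·.1) := by
  have h : ((PySem.List.enumerate target_data 0).foldl
        (fun d p => d.modify p.2 [] (fun l => l ++ [p.1])) PySem.Dict.empty)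
      = (((PySem.List.enumerate target_data 0).map Prod.swap).foldl
        (fun d p => d.modify p.1 [] (fun l => l ++ [p.2])) PySem.Dict.empty) := by
    rw [List.foldl_map]
    simp
  rw [h, PySem.Dict.getD_foldl_modify_append]
  simp [PySem.Dict.getD_empty, List.filter_map, Function.comp_def]

-- membership in an index list: i ∈ positions.getD v [] ↔ (i, v) ∈ enumerate
theorem pv_mem_positions (target_data : List Int) (v i : Int) :
    (i ∈ ((PySem.List.enumerate target_data 0).filter (fun p => p.2 == v)).map (·.1))
      ↔ (i, v) ∈ PySem.List.enumerate target_data 0 := by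
  simp only [List.mem_map, List.mem_filter, beq_iff_eq]
  constructor
  · rintro ⟨⟨a, b⟩, ⟨hmem, hv⟩, hi⟩
    simp only at hv hi
    subst hv; subst hi; exact hmem
  · intro h
    exact ⟨(i, v), ⟨h, rfl⟩, rfl⟩

-- the hit set stays Nodup through B's input loop
theorem pv_hit_nodup (input_data : List Int) (f g : Int → List Int) (s : PySem.Set Int)
    (hs : s.Nodup) :
    (input_data.foldl
      (fun s x => PySem.Set.update (PySem.Set.update s (f x)) (g x)) s).Nodup := by
  induction input_data generalizing s with
  | nil => exact hs
  | cons x xs ih =>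
    exact ih _ (PySem.Set.nodup_update _ _ (PySem.Set.nodup_update _ _ hs))

-- membership in the hit set built by B's input loop
theorem pv_mem_hit (input_data : List Int) (f g : Int → List Int) (s : PySem.Set Int) (i : Int) :
    (i ∈ input_data.foldl
      (fun s x => PySem.Set.update (PySem.Set.update s (f x)) (g x)) s)
      ↔ (i ∈ s ∨ ∃ x ∈ input_data, i ∈ f x ∨ i ∈ g x) := by
  induction input_data generalizing s with
  | nil => simp
  | cons x xs ih =>
    rw [List.foldl_cons, ih]
    rw [PySem.Set.mem_update, PySem.Set.mem_update]
    simp only [List.mem_cons]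
    constructor
    · rintro (((h | h) | h) | ⟨y, hy, h⟩)
      · exact Or.inl h
      · exact Or.inr ⟨x, Or.inl rfl, Or.inl h⟩
      · exact Or.inr ⟨x, Or.inl rfl, Or.inr h⟩
      · exact Or.inr ⟨y, Or.inr hy, h⟩
    · rintro (h | ⟨y, (rfl | hy), h⟩)
      · exact Or.inl (Or.inl (Or.inl h))
      · rcases h with h | h
        · exact Or.inl (Or.inl (Or.inr h))
        · exact Or.inl (Or.inr h)
      · exact Or.inr ⟨y, hy, h⟩

-- A's result is the strictly increasing list of indices passing the adjacency test
theorem pv_A_eq_filter (target_data : List Int) (input_data : List Int) :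
    calculate_edge_number_index target_data input_data
      = ((PySem.List.enumerate target_data 0).filter
          (fun p => decide (∃ x ∈ input_data, x = p.2 - 1 ∨ x = p.2 + 1))).map (·.1) := by
  unfold calculate_edge_number_index
  rw [PySem.List.foldl_congr_mem (g := fun acc (p : Int × Int) =>
      if decide (∃ x ∈ input_data, x = p.2 - 1 ∨ x = p.2 + 1) then acc ++ [p.1] else acc)]
  · rw [PySem.List.foldl_append_if]
    simp
  · intro acc p _
    simp only [decide_eq_true_eq]
    by_cases h : ∃ x ∈ input_data, x = p.2 - 1 ∨ x = p.2 + 1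
    · rw [if_pos ((pv_condA_iff input_data p.2).2 h), if_pos h]
    · rw [if_neg (fun hc => h ((pv_condA_iff input_data p.2).1 hc)), if_neg h]

-- ===== VERDICT (by name: the statement is the Claim_ definition above) =====
theorem calculate_edge_number_index_spec : Claim_equal_calculate_edge_number_index := by
  intro target_data input_data _
  unfold Spec_calculate_edge_number_index
  have hB : calculate_edge_number_index_alt target_data input_data
      = PySem.List.sorted
          (input_data.foldl
            (fun s x => PySem.Set.update (PySem.Set.update s
                (((PySem.List.enumerate target_data 0).foldl
                    (fun d p => d.modify p.2 [] (fun l => l ++ [p.1])) PySem.Dict.empty).getD (x - 1) []))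
                (((PySem.List.enumerate target_data 0).foldl
                    (fun d p => d.modify p.2 [] (fun l => l ++ [p.1])) PySem.Dict.empty).getD (x + 1) []))
            PySem.Set.empty)
          (fun i => i) false := rfl
  rw [hB, pv_A_eq_filter]
  set enum := PySem.List.enumerate target_data 0 with henum
  set L := (enum.filter (fun p => decide (∃ x ∈ input_data, x = p.2 - 1 ∨ x = p.2 + 1))).map (·.1) with hL
  set hit := input_data.foldl
      (fun s x => PySem.Set.update (PySem.Set.update s
          ((enum.foldl (fun d p => d.modify p.2 [] (fun l => l ++ [p.1])) PySem.Dict.empty).getD (x - 1) []))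
          ((enum.foldl (fun d p => d.modify p.2 [] (fun l => l ++ [p.1])) PySem.Dict.empty).getD (x + 1) []))
      PySem.Set.empty with hhit
  -- L is strictly increasing (indices of enumerate), hence Nodup
  have hLpw : L.Pairwise (· < ·) := by
    rw [hL]
    exact (List.pairwise_map).2
      ((List.Pairwise.filter _) (PySem.List.pairwise_lt_enumerate target_data 0))
  have hLnd : L.Nodup := hLpw.imp (fun h => ne_of_lt h)
  -- hit is Nodup (a Set built by update from empty)
  have hhitnd : hit.Nodup := pv_hit_nodup _ _ _ _ List.nodup_nil
  -- L and hit have the same members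
  have hmem : ∀ i, i ∈ L ↔ i ∈ hit := by
    intro i
    rw [hL, hhit, pv_mem_hit]
    simp only [PySem.Set.empty, List.not_mem_nil, false_or]
    constructor
    · intro h
      rcases List.mem_map.1 h with ⟨⟨a, num⟩, hmem', hi⟩
      rcases List.mem_filter.1 hmem' with ⟨hin, hcond⟩
      rcases of_decide_eq_true hcond with ⟨x, hx, hor⟩
      simp only at hi; subst hi
      refine ⟨x, hx, ?_⟩
      rw [pv_positions_getD, pv_positions_getD, pv_mem_positions, pv_mem_positions]
      rcases hor with h1 | h1
      · right
        have hnum : num = x + 1 := by omega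
        rw [← hnum]; exact hin
      · left
        have hnum : num = x - 1 := by omega
        rw [← hnum]; exact hin
    · rintro ⟨x, hx, hcase⟩
      rw [pv_positions_getD, pv_positions_getD, pv_mem_positions, pv_mem_positions] at hcase
      rcases hcase with hin | hin
      · exact List.mem_map.2 ⟨(i, x - 1), List.mem_filter.2 ⟨hin,
          decide_eq_true ⟨x, hx, by omega⟩⟩, rfl⟩
      · exact List.mem_map.2 ⟨(i, x + 1), List.mem_filter.2 ⟨hin,
          decide_eq_true ⟨x, hx, by omega⟩⟩, rfl⟩
  have hperm : L.Perm hit := (List.perm_ext_iff_of_nodup hLnd hhitnd).2 hmem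
  exact (PySem.List.sorted_eq_of_perm_of_pairwise_lt _ _ (fun i => i) hperm hLpw).symm
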